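-- pv_equiv track=rewrite | github.com/specfscty00/cyber-shield-bot | bot.py | check_tld_risk
-- ===== SOURCE A (Python) =====
-- CRITICAL_TLDS = ['.xin', '.bond', '.cfd', '.today', '.lol', '.zip', '.cam', '.help', '.win']
--
-- HIGH_RISK_TLDS = ['.top', '.xyz', '.shop', '.click', '.online', '.site', '.website', '.space', '.club', '.cc', '.pw', '.ml', '.tk', '.digital']
--
-- MEDIUM_RISK_TLDS = ['.app', '.arpa', '.io', '.me', '.info', '.buzz', '.live', '.rocks']
--
-- def check_tld_risk(domain):
--     domain_lower = domain.lower()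
--     for tld in CRITICAL_TLDS:
--         if domain_lower.endswith(tld):
--             return 5, f"Критически опасная доменная зона {tld}"
--     for tld in HIGH_RISK_TLDS:
--         if domain_lower.endswith(tld):
--             return 3, f"Опасная доменная зона {tld}"
--     for tld in MEDIUM_RISK_TLDS:
--         if domain_lower.endswith(tld):
--             return 2, f"Подозрительная доменная зона {tld}"
--     return 0, None
-- ===== SOURCE B (Python) =====
-- CRITICAL_TLDS = ['.xin', '.bond', '.cfd', '.today', '.lol', '.zip', '.cam', '.help', '.win']
--
-- HIGH_RISK_TLDS = ['.top', '.xyz', '.shop', '.click', '.online', '.site', '.website', '.space', '.club', '.cc', '.pw', '.ml', '.tk', '.digital']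
--
-- MEDIUM_RISK_TLDS = ['.app', '.arpa', '.io', '.me', '.info', '.buzz', '.live', '.rocks']
--
-- TLD_RISK = {}
-- for _tld in CRITICAL_TLDS:
--     TLD_RISK[_tld] = (5, f"Критически опасная доменная зона {_tld}")
-- for _tld in HIGH_RISK_TLDS:
--     TLD_RISK[_tld] = (3, f"Опасная доменная зона {_tld}")
-- for _tld in MEDIUM_RISK_TLDS:
--     TLD_RISK[_tld] = (2, f"Подозрительная доменная зона {_tld}")
--
-- def check_tld_risk(domain):
--     suffix = ""
--     for ch in domain.lower():
--         if ch == '.':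
--             suffix = "."
--         elif suffix:
--             suffix += ch
--     return TLD_RISK.get(suffix, (0, None))
-- ===== Notes on version B (the rewrite author's own statement) =====
-- stated objective: alternative
-- what changed: Replaces the three sequential endswith scans over 31 TLD lists by a single pass that extracts the last-dot suffix of the lowercased domain plus one lookup in a precomputed dict mapping each TLD to its (score, message).
import Mathlib
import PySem

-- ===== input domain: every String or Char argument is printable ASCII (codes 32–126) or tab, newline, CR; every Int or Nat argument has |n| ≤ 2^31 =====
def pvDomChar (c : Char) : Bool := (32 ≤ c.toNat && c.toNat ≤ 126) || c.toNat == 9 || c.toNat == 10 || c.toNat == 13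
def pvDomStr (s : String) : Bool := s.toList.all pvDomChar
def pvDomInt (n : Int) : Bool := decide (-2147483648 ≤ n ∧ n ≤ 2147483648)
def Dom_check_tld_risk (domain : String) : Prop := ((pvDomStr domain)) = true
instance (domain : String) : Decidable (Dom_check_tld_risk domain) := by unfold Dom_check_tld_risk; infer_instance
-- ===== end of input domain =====

-- B replaces A's three sequential endswith scans by one pass extracting the last-dot suffix plus a
-- single lookup in a precomputed TLD→(score, message) dict (objective: alternative; same result).

-- ===== PORT A =====
def CRITICAL_TLDS : List String := [".xin", ".bond", ".cfd", ".today", ".lol", ".zip", ".cam", ".help", ".win"]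

def HIGH_RISK_TLDS : List String := [".top", ".xyz", ".shop", ".click", ".online", ".site", ".website", ".space", ".club", ".cc", ".pw", ".ml", ".tk", ".digital"]

def MEDIUM_RISK_TLDS : List String := [".app", ".arpa", ".io", ".me", ".info", ".buzz", ".live", ".rocks"]

-- the 'for tld in …: if domain_lower.endswith(tld): return' loop, as a first-match helper
def tierFind (dl : String) : List String → Option String
  | [] => none
  | t :: rest => if PySem.Str.endswith dl t then some t else tierFind dl rest

def check_tld_risk (domain : String) : Int × Option String :=
  let dl := PySem.Str.lower domain
  match tierFind dl CRITICAL_TLDS with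
  | some t => (5, some ("Критически опасная доменная зона " ++ t))
  | none =>
    match tierFind dl HIGH_RISK_TLDS with
    | some t => (3, some ("Опасная доменная зона " ++ t))
    | none =>
      match tierFind dl MEDIUM_RISK_TLDS with
      | some t => (2, some ("Подозрительная доменная зона " ++ t))
      | none => (0, none)

-- ===== PORT B =====
-- Source B's module-level table: the three tier loops filling TLD_RISK
def TLD_RISK : PySem.Dict String (Int × Option String) :=
  let d := CRITICAL_TLDS.foldl
    (fun d t => d.insert t (5, some ("Критически опасная доменная зона " ++ t))) PySem.Dict.empty
  let d := HIGH_RISK_TLDS.foldl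
    (fun d t => d.insert t (3, some ("Опасная доменная зона " ++ t))) d
  MEDIUM_RISK_TLDS.foldl
    (fun d t => d.insert t (2, some ("Подозрительная доменная зона " ++ t))) d

-- Source B's accumulation loop: suffix = "." on a dot, suffix += ch while suffix is nonempty
def lastDotSuffix (l : List Char) : List Char :=
  l.foldl (fun s c => if c = '.' then ['.'] else if s ≠ [] then s ++ [c] else s) []

def check_tld_risk_alt (domain : String) : Int × Option String :=
  let suffix := lastDotSuffix (PySem.Str.lower domain).toList
  TLD_RISK.getD (String.ofList suffix) (0, none)

-- ===== PRECONDITION & SPEC =====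
def Spec_check_tld_risk (domain : String) (out : Int × Option String) : Prop := out = check_tld_risk_alt domain
instance (domain : String) (out : Int × Option String) : Decidable (Spec_check_tld_risk domain out) := by unfold Spec_check_tld_risk; infer_instance

-- ===== CLAIM (what is proved, stated in full; the proofs are below) =====
def Claim_equal_check_tld_risk : Prop := ∀ (domain : String), Dom_check_tld_risk domain → Spec_check_tld_risk domain (check_tld_risk domain)

-- ===== LEMMAS AND PROOFS =====

theorem lastDotSuffix_append (l : List Char) (c : Char) :
    lastDotSuffix (l ++ [c]) =
      if c = '.' then ['.'] else
        if lastDotSuffix l ≠ [] then lastDotSuffix l ++ [c] else lastDotSuffix l := by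
  simp [lastDotSuffix, List.foldl_append]

theorem lastDotSuffix_isSuffix (l : List Char) : lastDotSuffix l <:+ l := by
  induction l using List.reverseRecOn with
  | nil => simp [lastDotSuffix]
  | append_singleton l c ih =>
    rw [lastDotSuffix_append]
    split_ifs with h1 h2
    · exact ⟨l, by rw [h1]⟩
    · obtain ⟨pre, hpre⟩ := ih
      exact ⟨pre, by rw [← List.append_assoc, hpre]⟩
    · simp only [ne_eq, not_not] at h2
      simp [h2]

theorem lastDotSuffix_of_append (t : List Char) (h : ('.' : Char) ∉ t) :
    ∀ pre : List Char, lastDotSuffix (pre ++ '.' :: t) = '.' :: t := by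
  induction t using List.reverseRecOn with
  | nil => intro pre; rw [lastDotSuffix_append]; simp
  | append_singleton t' c ih =>
    intro pre
    have hc : c ≠ '.' := by simp at h; tauto
    have ht' : ('.' : Char) ∉ t' := by simp at h; tauto
    have : pre ++ '.' :: (t' ++ [c]) = (pre ++ '.' :: t') ++ [c] := by simp
    rw [this, lastDotSuffix_append, ih ht' pre]
    simp [hc]

theorem endswith_key (l : List Char) (k : String) (t : List Char)
    (hk : k.toList = '.' :: t) (h : ('.' : Char) ∉ t) :
    PySem.Chars.endswith l k.toList = decide (lastDotSuffix l = k.toList) := by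
  rw [hk]
  have hiff : (PySem.Chars.endswith l ('.' :: t) = true) ↔ lastDotSuffix l = '.' :: t := by
    rw [PySem.Chars.endswith_iff]
    constructor
    · rintro ⟨pre, rfl⟩; exact lastDotSuffix_of_append t h pre
    · intro hd; exact hd ▸ lastDotSuffix_isSuffix l
  cases hE : PySem.Chars.endswith l ('.' :: t) <;> simp_all

theorem ofList_eq_iff (s : List Char) (k : String) : (String.ofList s = k) ↔ s = k.toList := by
  constructor <;> intro h <;> simp_all [String.ext_iff]

-- ===== VERDICT (by name: the statement is the Claim_ definition above) =====
theorem check_tld_risk_spec : Claim_equal_check_tld_risk := by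
  intro domain _
  unfold Spec_check_tld_risk check_tld_risk check_tld_risk_alt
  have hk0 : ∀ l : List Char, PySem.Chars.endswith l (".xin").toList = decide (lastDotSuffix l = (".xin").toList) :=
    fun l => endswith_key l ".xin" ['x', 'i', 'n'] (by decide) (by decide)
  have hk1 : ∀ l : List Char, PySem.Chars.endswith l (".bond").toList = decide (lastDotSuffix l = (".bond").toList) :=
    fun l => endswith_key l ".bond" ['b', 'o', 'n', 'd'] (by decide) (by decide)
  have hk2 : ∀ l : List Char, PySem.Chars.endswith l (".cfd").toList = decide (lastDotSuffix l = (".cfd").toList) :=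
    fun l => endswith_key l ".cfd" ['c', 'f', 'd'] (by decide) (by decide)
  have hk3 : ∀ l : List Char, PySem.Chars.endswith l (".today").toList = decide (lastDotSuffix l = (".today").toList) :=
    fun l => endswith_key l ".today" ['t', 'o', 'd', 'a', 'y'] (by decide) (by decide)
  have hk4 : ∀ l : List Char, PySem.Chars.endswith l (".lol").toList = decide (lastDotSuffix l = (".lol").toList) :=
    fun l => endswith_key l ".lol" ['l', 'o', 'l'] (by decide) (by decide)
  have hk5 : ∀ l : List Char, PySem.Chars.endswith l (".zip").toList = decide (lastDotSuffix l = (".zip").toList) :=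
    fun l => endswith_key l ".zip" ['z', 'i', 'p'] (by decide) (by decide)
  have hk6 : ∀ l : List Char, PySem.Chars.endswith l (".cam").toList = decide (lastDotSuffix l = (".cam").toList) :=
    fun l => endswith_key l ".cam" ['c', 'a', 'm'] (by decide) (by decide)
  have hk7 : ∀ l : List Char, PySem.Chars.endswith l (".help").toList = decide (lastDotSuffix l = (".help").toList) :=
    fun l => endswith_key l ".help" ['h', 'e', 'l', 'p'] (by decide) (by decide)
  have hk8 : ∀ l : List Char, PySem.Chars.endswith l (".win").toList = decide (lastDotSuffix l = (".win").toList) :=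
    fun l => endswith_key l ".win" ['w', 'i', 'n'] (by decide) (by decide)
  have hk9 : ∀ l : List Char, PySem.Chars.endswith l (".top").toList = decide (lastDotSuffix l = (".top").toList) :=
    fun l => endswith_key l ".top" ['t', 'o', 'p'] (by decide) (by decide)
  have hk10 : ∀ l : List Char, PySem.Chars.endswith l (".xyz").toList = decide (lastDotSuffix l = (".xyz").toList) :=
    fun l => endswith_key l ".xyz" ['x', 'y', 'z'] (by decide) (by decide)
  have hk11 : ∀ l : List Char, PySem.Chars.endswith l (".shop").toList = decide (lastDotSuffix l = (".shop").toList) :=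
    fun l => endswith_key l ".shop" ['s', 'h', 'o', 'p'] (by decide) (by decide)
  have hk12 : ∀ l : List Char, PySem.Chars.endswith l (".click").toList = decide (lastDotSuffix l = (".click").toList) :=
    fun l => endswith_key l ".click" ['c', 'l', 'i', 'c', 'k'] (by decide) (by decide)
  have hk13 : ∀ l : List Char, PySem.Chars.endswith l (".online").toList = decide (lastDotSuffix l = (".online").toList) :=
    fun l => endswith_key l ".online" ['o', 'n', 'l', 'i', 'n', 'e'] (by decide) (by decide)
  have hk14 : ∀ l : List Char, PySem.Chars.endswith l (".site").toList = decide (lastDotSuffix l = (".site").toList) :=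
    fun l => endswith_key l ".site" ['s', 'i', 't', 'e'] (by decide) (by decide)
  have hk15 : ∀ l : List Char, PySem.Chars.endswith l (".website").toList = decide (lastDotSuffix l = (".website").toList) :=
    fun l => endswith_key l ".website" ['w', 'e', 'b', 's', 'i', 't', 'e'] (by decide) (by decide)
  have hk16 : ∀ l : List Char, PySem.Chars.endswith l (".space").toList = decide (lastDotSuffix l = (".space").toList) :=
    fun l => endswith_key l ".space" ['s', 'p', 'a', 'c', 'e'] (by decide) (by decide)
  have hk17 : ∀ l : List Char, PySem.Chars.endswith l (".club").toList = decide (lastDotSuffix l = (".club").toList) :=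
    fun l => endswith_key l ".club" ['c', 'l', 'u', 'b'] (by decide) (by decide)
  have hk18 : ∀ l : List Char, PySem.Chars.endswith l (".cc").toList = decide (lastDotSuffix l = (".cc").toList) :=
    fun l => endswith_key l ".cc" ['c', 'c'] (by decide) (by decide)
  have hk19 : ∀ l : List Char, PySem.Chars.endswith l (".pw").toList = decide (lastDotSuffix l = (".pw").toList) :=
    fun l => endswith_key l ".pw" ['p', 'w'] (by decide) (by decide)
  have hk20 : ∀ l : List Char, PySem.Chars.endswith l (".ml").toList = decide (lastDotSuffix l = (".ml").toList) :=
    fun l => endswith_key l ".ml" ['m', 'l'] (by decide) (by decide)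
  have hk21 : ∀ l : List Char, PySem.Chars.endswith l (".tk").toList = decide (lastDotSuffix l = (".tk").toList) :=
    fun l => endswith_key l ".tk" ['t', 'k'] (by decide) (by decide)
  have hk22 : ∀ l : List Char, PySem.Chars.endswith l (".digital").toList = decide (lastDotSuffix l = (".digital").toList) :=
    fun l => endswith_key l ".digital" ['d', 'i', 'g', 'i', 't', 'a', 'l'] (by decide) (by decide)
  have hk23 : ∀ l : List Char, PySem.Chars.endswith l (".app").toList = decide (lastDotSuffix l = (".app").toList) :=
    fun l => endswith_key l ".app" ['a', 'p', 'p'] (by decide) (by decide)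
  have hk24 : ∀ l : List Char, PySem.Chars.endswith l (".arpa").toList = decide (lastDotSuffix l = (".arpa").toList) :=
    fun l => endswith_key l ".arpa" ['a', 'r', 'p', 'a'] (by decide) (by decide)
  have hk25 : ∀ l : List Char, PySem.Chars.endswith l (".io").toList = decide (lastDotSuffix l = (".io").toList) :=
    fun l => endswith_key l ".io" ['i', 'o'] (by decide) (by decide)
  have hk26 : ∀ l : List Char, PySem.Chars.endswith l (".me").toList = decide (lastDotSuffix l = (".me").toList) :=
    fun l => endswith_key l ".me" ['m', 'e'] (by decide) (by decide)
  have hk27 : ∀ l : List Char, PySem.Chars.endswith l (".info").toList = decide (lastDotSuffix l = (".info").toList) :=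
    fun l => endswith_key l ".info" ['i', 'n', 'f', 'o'] (by decide) (by decide)
  have hk28 : ∀ l : List Char, PySem.Chars.endswith l (".buzz").toList = decide (lastDotSuffix l = (".buzz").toList) :=
    fun l => endswith_key l ".buzz" ['b', 'u', 'z', 'z'] (by decide) (by decide)
  have hk29 : ∀ l : List Char, PySem.Chars.endswith l (".live").toList = decide (lastDotSuffix l = (".live").toList) :=
    fun l => endswith_key l ".live" ['l', 'i', 'v', 'e'] (by decide) (by decide)
  have hk30 : ∀ l : List Char, PySem.Chars.endswith l (".rocks").toList = decide (lastDotSuffix l = (".rocks").toList) :=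
    fun l => endswith_key l ".rocks" ['r', 'o', 'c', 'k', 's'] (by decide) (by decide)
  simp only [CRITICAL_TLDS, HIGH_RISK_TLDS, MEDIUM_RISK_TLDS, TLD_RISK, tierFind, List.foldl,
    PySem.Str.endswith_eq, hk0, hk1, hk2, hk3, hk4, hk5, hk6, hk7, hk8, hk9, hk10, hk11, hk12, hk13, hk14, hk15, hk16, hk17, hk18, hk19, hk20, hk21, hk22, hk23, hk24, hk25, hk26, hk27, hk28, hk29, hk30]
  generalize lastDotSuffix (PySem.Str.lower domain).toList = s
  by_cases h0 : s = (".xin").toList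
  · subst h0; decide
  by_cases h1 : s = (".bond").toList
  · subst h1; decide
  by_cases h2 : s = (".cfd").toList
  · subst h2; decide
  by_cases h3 : s = (".today").toList
  · subst h3; decide
  by_cases h4 : s = (".lol").toList
  · subst h4; decide
  by_cases h5 : s = (".zip").toList
  · subst h5; decide
  by_cases h6 : s = (".cam").toList
  · subst h6; decide
  by_cases h7 : s = (".help").toList
  · subst h7; decide
  by_cases h8 : s = (".win").toList
  · subst h8; decide
  by_cases h9 : s = (".top").toList
  · subst h9; decide
  by_cases h10 : s = (".xyz").toList
  · subst h10; decide
  by_cases h11 : s = (".shop").toList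
  · subst h11; decide
  by_cases h12 : s = (".click").toList
  · subst h12; decide
  by_cases h13 : s = (".online").toList
  · subst h13; decide
  by_cases h14 : s = (".site").toList
  · subst h14; decide
  by_cases h15 : s = (".website").toList
  · subst h15; decide
  by_cases h16 : s = (".space").toList
  · subst h16; decide
  by_cases h17 : s = (".club").toList
  · subst h17; decide
  by_cases h18 : s = (".cc").toList
  · subst h18; decide
  by_cases h19 : s = (".pw").toList
  · subst h19; decide
  by_cases h20 : s = (".ml").toList
  · subst h20; decide
  by_cases h21 : s = (".tk").toList
  · subst h21; decide
  by_cases h22 : s = (".digital").toList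
  · subst h22; decide
  by_cases h23 : s = (".app").toList
  · subst h23; decide
  by_cases h24 : s = (".arpa").toList
  · subst h24; decide
  by_cases h25 : s = (".io").toList
  · subst h25; decide
  by_cases h26 : s = (".me").toList
  · subst h26; decide
  by_cases h27 : s = (".info").toList
  · subst h27; decide
  by_cases h28 : s = (".buzz").toList
  · subst h28; decide
  by_cases h29 : s = (".live").toList
  · subst h29; decide
  by_cases h30 : s = (".rocks").toList
  · subst h30; decide
  simp_all [PySem.Dict.getD_insert, PySem.Dict.getD_empty, ofList_eq_iff]
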